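-- pv_equiv track=rewrite | github.com/qniman/YAP4 | PR14/main.py | count
-- ===== SOURCE A (Python) =====
-- def count(lst):
--     counter = 0
--     counting = False
--
--     for i in lst:
--         if counting:
--             if i % 2 == 0:
--                 counting = False
--                 break
--             else:
--                 counter += 1
--         else:
--             if i % 2 == 0:
--                 counting = True
--
--     return counter
-- ===== SOURCE B (Python) =====
-- def count(lst):
--     # Phase 1: locate the first even element.
--     start = next((idx for idx, x in enumerate(lst) if x % 2 == 0), None)
--     if start is None:
--         return 0
--     # Phase 2: length of the odd prefix of the remainder.
--     tail = lst[start + 1:]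
--     n = 0
--     while n < len(tail) and tail[n] % 2 != 0:
--         n += 1
--     return n
-- ===== Notes on version B (the rewrite author's own statement) =====
-- stated objective: simpler
-- what changed: Replaces A's single boolean-flag state machine with two separate phases: find the index of the first even element, then measure the odd prefix of the slice after it.
import Mathlib
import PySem

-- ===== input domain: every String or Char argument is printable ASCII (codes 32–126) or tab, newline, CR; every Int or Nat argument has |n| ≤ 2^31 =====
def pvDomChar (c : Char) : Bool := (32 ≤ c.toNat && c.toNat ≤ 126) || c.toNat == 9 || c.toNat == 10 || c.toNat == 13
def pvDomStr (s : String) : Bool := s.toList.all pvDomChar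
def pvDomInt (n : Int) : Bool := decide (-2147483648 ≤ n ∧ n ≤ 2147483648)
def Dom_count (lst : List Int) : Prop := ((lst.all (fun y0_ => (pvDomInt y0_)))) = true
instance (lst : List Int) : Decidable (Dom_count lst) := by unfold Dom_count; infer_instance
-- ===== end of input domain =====

-- B: two-phase (find first even, then count odd prefix of the slice after it) instead of A's boolean-flag loop; same O(n) cost.
-- ===== PORT A =====
-- A's for-loop with state (counter, counting) and a break, as structural recursion over lst.
def countLoopA : List Int → Int → Bool → Int
  | [], counter, _ => counter
  | i :: rest, counter, counting =>
    if counting then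
      if i % 2 == 0 then counter  -- break
      else countLoopA rest (counter + 1) counting
    else
      if i % 2 == 0 then countLoopA rest counter true
      else countLoopA rest counter counting

def count (lst : List Int) : Int := countLoopA lst 0 false

-- ===== PORT B =====
-- length of the odd prefix (Source B's while loop over the tail)
def oddPrefixLen : List Int → Int
  | [] => 0
  | x :: r => if x % 2 ≠ 0 then 1 + oddPrefixLen r else 0

def count_alt (lst : List Int) : Int :=
  match lst.findIdx? (fun x => x % 2 == 0) with
  | none => 0
  | some start => oddPrefixLen (lst.drop (start + 1))

-- ===== PRECONDITION & SPEC =====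
def Spec_count (lst : List Int) (out : Int) : Prop := out = count_alt lst
instance (lst : List Int) (out : Int) : Decidable (Spec_count lst out) := by unfold Spec_count; infer_instance

-- ===== CLAIM (what is proved, stated in full; the proofs are below) =====
def Claim_equal_count : Prop := ∀ (lst : List Int), Dom_count lst → Spec_count lst (count lst)

-- ===== LEMMAS AND PROOFS =====

-- ===== VERDICT (by name: the statement is the Claim_ definition above) =====
theorem countLoopA_true (l : List Int) (c : Int) :
    countLoopA l c true = c + oddPrefixLen l := by
  induction l generalizing c with
  | nil => simp [countLoopA, oddPrefixLen]
  | cons x r ih =>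
    by_cases h : x % 2 = 0 <;> simp [countLoopA, oddPrefixLen, h, ih] <;> ring

theorem count_eq_alt (l : List Int) : count l = count_alt l := by
  induction l with
  | nil => simp [count, count_alt, countLoopA, List.findIdx?_nil]
  | cons x r ih =>
    by_cases h : x % 2 = 0
    · simp [count, count_alt, countLoopA, h, List.findIdx?_cons, countLoopA_true]
    · simp only [count, count_alt, countLoopA] at *
      simp only [List.findIdx?_cons, h, beq_iff_eq, if_false] at *
      cases hf : r.findIdx? (fun x => x % 2 == 0) with
      | none => simpa [hf] using ih
      | some i => simpa [hf] using ih

theorem count_spec : Claim_equal_count := by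
  intro lst _
  unfold Spec_count
  exact count_eq_alt lst
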